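-- pv_equiv track=rewrite | github.com/mrarejimmyz/parmanus | main.py | route_agent
-- ===== SOURCE A (Python) =====
-- def route_agent(prompt: str, use_full_agents: bool = True) -> str:
--     """Route to appropriate agent based on prompt."""
--     prompt_lower = prompt.lower()
--
--     if any(word in prompt_lower for word in ["code", "program", "script", "debug", "function", "python", "javascript"]):
--         return "code"
--     elif any(word in prompt_lower for word in ["browse", "web", "scrape", "website", "url", "browser"]):
--         return "browser"
--     elif any(word in prompt_lower for word in ["file", "save", "read", "write", "data", "edit"]):
--         return "file"
--     elif any(word in prompt_lower for word in ["plan", "schedule", "task", "organize", "steps"]):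
--         return "planner"
--     else:
--         return "manus"
-- ===== SOURCE B (Python) =====
-- # Single left-to-right scan of the lowered prompt: at each position collect the
-- # categories whose keyword starts there, then pick the highest-priority matched
-- # category.  No per-category substring searches.
--
-- KEYWORDS = [
--     ("code", "code"), ("program", "code"), ("script", "code"), ("debug", "code"),
--     ("function", "code"), ("python", "code"), ("javascript", "code"),
--     ("browse", "browser"), ("web", "browser"), ("scrape", "browser"),
--     ("website", "browser"), ("url", "browser"), ("browser", "browser"),
--     ("file", "file"), ("save", "file"), ("read", "file"), ("write", "file"),
--     ("data", "file"), ("edit", "file"),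
--     ("plan", "planner"), ("schedule", "planner"), ("task", "planner"),
--     ("organize", "planner"), ("steps", "planner"),
-- ]
--
-- PRIORITY = ["code", "browser", "file", "planner"]
--
--
-- def route_agent(prompt: str, use_full_agents: bool = True) -> str:
--     """Route to appropriate agent based on prompt."""
--     p = prompt.lower()
--     matched = set()
--     for i in range(len(p)):
--         for kw, cat in KEYWORDS:
--             if p.startswith(kw, i):
--                 matched.add(cat)
--     for cat in PRIORITY:
--         if cat in matched:
--             return cat
--     return "manus"
-- ===== Notes on version B (the rewrite author's own statement) =====
-- stated objective: alternative
-- what changed: Instead of running a substring search per keyword in an if/elif chain, B makes one left-to-right scan over the lowered prompt, at each position collecting the categories whose keyword starts there into a set, and finally returns the first category in priority order that was matched.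
import Mathlib
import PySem

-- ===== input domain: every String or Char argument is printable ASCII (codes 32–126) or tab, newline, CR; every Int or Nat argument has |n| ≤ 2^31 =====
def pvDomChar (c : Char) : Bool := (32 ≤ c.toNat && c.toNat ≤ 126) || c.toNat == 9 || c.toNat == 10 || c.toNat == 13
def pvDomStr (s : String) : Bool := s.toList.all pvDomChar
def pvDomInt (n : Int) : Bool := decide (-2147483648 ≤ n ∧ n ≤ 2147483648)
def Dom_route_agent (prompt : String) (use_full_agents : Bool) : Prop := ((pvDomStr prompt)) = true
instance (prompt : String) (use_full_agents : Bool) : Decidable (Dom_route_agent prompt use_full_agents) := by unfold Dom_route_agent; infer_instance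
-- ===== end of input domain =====

-- B replaces A's per-category substring searches by a single positional scan of the
-- lowered prompt collecting matched categories into a set, then a priority lookup;
-- objective: alternative (same cost, different algorithm).

-- ===== PORT A =====
def route_agent (prompt : String) (use_full_agents : Bool) : String :=
  let prompt_lower := PySem.Str.lower prompt
  if (["code", "program", "script", "debug", "function", "python", "javascript"].any
        (fun word => PySem.Str.isIn word prompt_lower)) then "code"
  else if (["browse", "web", "scrape", "website", "url", "browser"].any
        (fun word => PySem.Str.isIn word prompt_lower)) then "browser"
  else if (["file", "save", "read", "write", "data", "edit"].any
        (fun word => PySem.Str.isIn word prompt_lower)) then "file"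
  else if (["plan", "schedule", "task", "organize", "steps"].any
        (fun word => PySem.Str.isIn word prompt_lower)) then "planner"
  else "manus"

-- ===== PORT B =====
-- Source B's KEYWORDS table (keywords as char lists, categories as strings)
def pvKeywords : List (List Char × String) :=
  [("code".toList, "code"), ("program".toList, "code"), ("script".toList, "code"),
   ("debug".toList, "code"), ("function".toList, "code"), ("python".toList, "code"),
   ("javascript".toList, "code"),
   ("browse".toList, "browser"), ("web".toList, "browser"), ("scrape".toList, "browser"),
   ("website".toList, "browser"), ("url".toList, "browser"), ("browser".toList, "browser"),
   ("file".toList, "file"), ("save".toList, "file"), ("read".toList, "file"),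
   ("write".toList, "file"), ("data".toList, "file"), ("edit".toList, "file"),
   ("plan".toList, "planner"), ("schedule".toList, "planner"), ("task".toList, "planner"),
   ("organize".toList, "planner"), ("steps".toList, "planner")]

def pvPriority : List String := ["code", "browser", "file", "planner"]

-- inner loop: for kw, cat in KEYWORDS: if p.startswith(kw, i): matched.add(cat)
def pvAddMatches (p : List Char) (i : Int) (matched : PySem.Set String) : PySem.Set String :=
  pvKeywords.foldl
    (fun s kc => if PySem.Chars.startswith (p.drop i.toNat) kc.1 then PySem.Set.add s kc.2 else s)
    matched

-- final loop: for cat in PRIORITY: if cat in matched: return cat; return "manus"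
def pvPick (matched : PySem.Set String) : List String → String
  | [] => "manus"
  | c :: rest => if PySem.Set.contains matched c then c else pvPick matched rest

def route_agent_alt (prompt : String) (use_full_agents : Bool) : String :=
  let p := PySem.Chars.lower prompt.toList
  let matched := (PySem.List.pyRange 0 p.length 1).foldl
      (fun acc i => pvAddMatches p i acc) PySem.Set.empty
  pvPick matched pvPriority

-- ===== PRECONDITION & SPEC =====
def Spec_route_agent (prompt : String) (use_full_agents : Bool) (out : String) : Prop :=
  out = route_agent_alt prompt use_full_agents
instance (prompt : String) (use_full_agents : Bool) (out : String) :
    Decidable (Spec_route_agent prompt use_full_agents out) := by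
  unfold Spec_route_agent; infer_instance

-- ===== CLAIM =====
def Claim_equal_route_agent : Prop := ∀ (prompt : String) (use_full_agents : Bool),
  Dom_route_agent prompt use_full_agents →
  Spec_route_agent prompt use_full_agents (route_agent prompt use_full_agents)

-- ===== LEMMAS AND PROOFS =====

theorem mem_pvAddMatches (p : List Char) (i : Int) (acc : PySem.Set String) (y : String) :
    y ∈ pvAddMatches p i acc ↔
      y ∈ acc ∨ ∃ kc ∈ pvKeywords, PySem.Chars.startswith (p.drop i.toNat) kc.1 = true ∧ kc.2 = y := by
  unfold pvAddMatches
  generalize pvKeywords = l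
  induction l generalizing acc with
  | nil => simp
  | cons kc rest ih =>
      simp only [List.foldl_cons, ih, List.mem_cons]
      split_ifs with h
      · simp only [PySem.Set.mem_add]
        constructor
        · rintro (((hy | hy) | ⟨kc', hkc', hs, hc⟩))
          · exact Or.inl hy
          · exact Or.inr ⟨kc, Or.inl rfl, h, hy.symm⟩
          · exact Or.inr ⟨kc', Or.inr hkc', hs, hc⟩
        · rintro (hy | ⟨kc', (rfl | hkc'), hs, hc⟩)
          · exact Or.inl (Or.inl hy)
          · exact Or.inl (Or.inr hc.symm)
          · exact Or.inr ⟨kc', hkc', hs, hc⟩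
      · constructor
        · rintro (hy | ⟨kc', hkc', hs, hc⟩)
          · exact Or.inl hy
          · exact Or.inr ⟨kc', Or.inr hkc', hs, hc⟩
        · rintro (hy | ⟨kc', (rfl | hkc'), hs, hc⟩)
          · exact Or.inl hy
          · exact absurd hs h
          · exact Or.inr ⟨kc', hkc', hs, hc⟩

theorem mem_scan (p : List Char) (l : List Int) (acc : PySem.Set String) (y : String) :
    y ∈ l.foldl (fun acc i => pvAddMatches p i acc) acc ↔
      y ∈ acc ∨ ∃ i ∈ l, ∃ kc ∈ pvKeywords,
        PySem.Chars.startswith (p.drop i.toNat) kc.1 = true ∧ kc.2 = y := by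
  induction l generalizing acc with
  | nil => simp
  | cons i rest ih =>
      simp only [List.foldl_cons, ih, mem_pvAddMatches, List.mem_cons]
      constructor
      · rintro ((hy | ⟨kc, hkc, hs, hc⟩) | ⟨j, hj, kc, hkc, hs, hc⟩)
        · exact Or.inl hy
        · exact Or.inr ⟨i, Or.inl rfl, kc, hkc, hs, hc⟩
        · exact Or.inr ⟨j, Or.inr hj, kc, hkc, hs, hc⟩
      · rintro (hy | ⟨j, (rfl | hj), kc, hkc, hs, hc⟩)
        · exact Or.inl (Or.inl hy)
        · exact Or.inl (Or.inr ⟨kc, hkc, hs, hc⟩)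
        · exact Or.inr ⟨j, hj, kc, hkc, hs, hc⟩

theorem pvKeywords_ne_nil : ∀ kc ∈ pvKeywords, kc.1 ≠ [] := by decide

-- a nonempty keyword occurs in p iff it starts at some scanned position
theorem scan_finds (p kw : List Char) (hkw : kw ≠ []) :
    (∃ i ∈ PySem.List.pyRange 0 p.length 1,
        PySem.Chars.startswith (p.drop i.toNat) kw = true) ↔
      PySem.Chars.isIn kw p = true := by
  rw [← PySem.Chars.exists_prefix_drop_iff_isIn]
  constructor
  · rintro ⟨i, _, hs⟩
    exact ⟨i.toNat, (PySem.Chars.startswith_iff _ _).1 hs⟩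
  · rintro ⟨j, hj⟩
    have hjlen : j < p.length := by
      by_contra hge
      push_neg at hge
      rw [List.drop_eq_nil_of_le hge] at hj
      exact hkw (List.prefix_nil.1 hj)
    refine ⟨(j : Int), ?_, ?_⟩
    · rw [PySem.List.mem_pyRange_one]
      constructor
      · exact Int.natCast_nonneg j
      · exact_mod_cast hjlen
    · rw [PySem.Chars.startswith_iff]
      simpa using hj

-- ===== VERDICT =====
theorem route_agent_spec : Claim_equal_route_agent := by
  intro prompt use_full_agents _
  unfold Spec_route_agent route_agent route_agent_alt
  set p := PySem.Chars.lower prompt.toList with hp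
  have hmem : ∀ y, (y ∈ (PySem.List.pyRange 0 (p.length : Int) 1).foldl
      (fun acc i => pvAddMatches p i acc) PySem.Set.empty) ↔
      ∃ kc ∈ pvKeywords, PySem.Chars.isIn kc.1 p = true ∧ kc.2 = y := by
    intro y
    rw [mem_scan]
    simp only [PySem.Set.empty, List.not_mem_nil, false_or]
    constructor
    · rintro ⟨i, hi, kc, hkc, hs, hc⟩
      refine ⟨kc, hkc, ?_, hc⟩
      exact (scan_finds p kc.1 (pvKeywords_ne_nil kc hkc)).1 ⟨i, hi, hs⟩
    · rintro ⟨kc, hkc, hin, hc⟩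
      obtain ⟨i, hi, hs⟩ := (scan_finds p kc.1 (pvKeywords_ne_nil kc hkc)).2 hin
      exact ⟨i, hi, kc, hkc, hs, hc⟩
  -- the four category-matched booleans
  have hcontains : ∀ c : String,
      PySem.Set.contains ((PySem.List.pyRange 0 (p.length : Int) 1).foldl
        (fun acc i => pvAddMatches p i acc) PySem.Set.empty) c =
      (pvKeywords.filter (fun kc => kc.2 == c)).any (fun kc => PySem.Chars.isIn kc.1 p) := by
    intro c
    by_cases h : ∃ kc ∈ pvKeywords, PySem.Chars.isIn kc.1 p = true ∧ kc.2 = c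
    · have := (hmem c).2 h
      rw [(PySem.Set.contains_iff _ _).2 this]
      obtain ⟨kc, hkc, hin, hc⟩ := h
      symm
      rw [List.any_eq_true]
      exact ⟨kc, List.mem_filter.2 ⟨hkc, by simp [hc]⟩, hin⟩
    · have hnot : PySem.Set.contains ((PySem.List.pyRange 0 (p.length : Int) 1).foldl
          (fun acc i => pvAddMatches p i acc) PySem.Set.empty) c = false := by
        rw [Bool.eq_false_iff]
        intro hcontr
        exact h ((hmem c).1 ((PySem.Set.contains_iff _ _).1 hcontr))
      rw [hnot]
      symm
      rw [List.any_eq_false]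
      intro kc hkc
      rw [List.mem_filter] at hkc
      intro hin
      exact h ⟨kc, hkc.1, hin, by simpa using hkc.2⟩
  show _ = pvPick _ pvPriority
  simp only [pvPriority, pvPick]
  rw [hcontains "code", hcontains "browser", hcontains "file", hcontains "planner"]
  simp [pvKeywords, List.any_cons, PySem.Str.isIn_eq,
        PySem.Str.toList_lower, hp]
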